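-- pv_equiv track=rewrite | github.com/linguistica-uchicago/lxa5 | linguistica/phon.py | make_word_ngrams
-- ===== SOURCE A (Python) =====
-- from collections import Counter
--
-- def make_word_ngrams(word_unigram_counter=None):
--     uniphone_counter = Counter()
--     biphone_counter = Counter()
--     triphone_counter = Counter()
--
--     for word, freq in word_unigram_counter.items():
--         word = '#' + word + '#'  # add word boundaries
--
--         uniphones = list(word)
--         biphones = zip(*[uniphones[i:] for i in range(2)])
--         triphones = zip(*[uniphones[i:] for i in range(3)])
--
--         for uniphone in uniphones:
--             uniphone_counter[uniphone] += freq
--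
--         for biphone in biphones:
--             biphone_counter[biphone] += freq
--
--         for triphone in triphones:
--             triphone_counter[triphone] += freq
--
--     return dict(uniphone_counter), dict(biphone_counter), dict(triphone_counter)
-- ===== SOURCE B (Python) =====
-- def make_word_ngrams(word_unigram_counter=None):
--     uniphone_counts = {}
--     biphone_counts = {}
--     triphone_counts = {}
--
--     for word, freq in word_unigram_counter.items():
--         prev2 = prev1 = None
--         for ch in '#' + word + '#':
--             uniphone_counts[ch] = uniphone_counts.get(ch, 0) + freq
--             if prev1 is not None:
--                 b = (prev1, ch)
--                 biphone_counts[b] = biphone_counts.get(b, 0) + freq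
--                 if prev2 is not None:
--                     t = (prev2, prev1, ch)
--                     triphone_counts[t] = triphone_counts.get(t, 0) + freq
--             prev2, prev1 = prev1, ch
--
--     return uniphone_counts, biphone_counts, triphone_counts
-- ===== Notes on version B (the rewrite author's own statement) =====
-- stated objective: faster
-- what changed: Replaces the three materialized zip-based n-gram sequences and three separate counting loops per word with a single sliding-window pass that carries the previous two characters as state and updates plain dicts in one traversal.
import Mathlib
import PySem

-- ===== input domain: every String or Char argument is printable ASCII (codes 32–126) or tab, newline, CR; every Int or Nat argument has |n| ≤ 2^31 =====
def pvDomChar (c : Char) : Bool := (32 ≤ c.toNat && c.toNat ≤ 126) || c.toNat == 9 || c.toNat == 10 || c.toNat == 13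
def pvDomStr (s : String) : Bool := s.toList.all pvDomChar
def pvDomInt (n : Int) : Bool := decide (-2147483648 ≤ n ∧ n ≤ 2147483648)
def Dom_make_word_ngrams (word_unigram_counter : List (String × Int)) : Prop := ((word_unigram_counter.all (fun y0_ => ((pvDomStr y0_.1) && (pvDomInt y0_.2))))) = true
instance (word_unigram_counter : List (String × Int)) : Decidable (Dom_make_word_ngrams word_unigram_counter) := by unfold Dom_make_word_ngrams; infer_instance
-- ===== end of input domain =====

-- B replaces A's three zip-built n-gram sequences and three counting loops per word by one
-- sliding-window pass carrying the previous two characters; same results, different decomposition.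


-- the counter state shared by both ports: (uniphone, biphone, triphone) counters
def pvState := PySem.Dict String Int × PySem.Dict (List String) Int × PySem.Dict (List String) Int

-- ===== PORT A =====
-- Python's zip of three sequences (stops at the shortest) — exact
def pvZip3 {α β γ : Type} : List α → List β → List γ → List (α × β × γ)
  | a :: as, b :: bs, c :: cs => (a, b, c) :: pvZip3 as bs cs
  | _, _, _ => []

def make_word_ngrams (word_unigram_counter : List (String × Int)) :
    (List (String × Int)) × (List (List String × Int)) × (List (List String × Int)) :=
  let s : pvState :=
    word_unigram_counter.foldl (fun (s : pvState) p =>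
      let (u, b, t) := s
      let freq := p.2
      let word := '#' :: p.1.toList ++ ['#']      -- '#' + word + '#'
      let uniphones := word                        -- list(word)
      let biphones := uniphones.zip (uniphones.drop 1)               -- zip(word, word[1:])
      let triphones := pvZip3 uniphones (uniphones.drop 1) (uniphones.drop 2)  -- zip of 3 slices
      let u := uniphones.foldl (fun d c => d.modify c.toString 0 (· + freq)) u
      let b := biphones.foldl (fun d q => d.modify [q.1.toString, q.2.toString] 0 (· + freq)) b
      let t := triphones.foldl
        (fun d q => d.modify [q.1.toString, q.2.1.toString, q.2.2.toString] 0 (· + freq)) t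
      (u, b, t))
      (PySem.Dict.empty, PySem.Dict.empty, PySem.Dict.empty)
  (s.1.items, s.2.1.items, s.2.2.items)

-- ===== PORT B =====
-- one sliding-window pass over the padded word: prev2/prev1 are the two previous characters
def pvScan (freq : Int) : List Char → Option Char → Option Char → pvState → pvState
  | [], _, _, s => s
  | ch :: rest, prev2, prev1, (u, b, t) =>
    let u := u.insert ch.toString (u.getD ch.toString 0 + freq)
    let (b, t) :=
      match prev1 with
      | none => (b, t)
      | some p1 =>
        let kb := [p1.toString, ch.toString]
        let b := b.insert kb (b.getD kb 0 + freq)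
        match prev2 with
        | none => (b, t)
        | some p2 =>
          let kt := [p2.toString, p1.toString, ch.toString]
          (b, t.insert kt (t.getD kt 0 + freq))
    pvScan freq rest prev1 (some ch) (u, b, t)

def make_word_ngrams_alt (word_unigram_counter : List (String × Int)) :
    (List (String × Int)) × (List (List String × Int)) × (List (List String × Int)) :=
  let s : pvState :=
    word_unigram_counter.foldl (fun (s : pvState) p =>
      pvScan p.2 ('#' :: p.1.toList ++ ['#']) none none s)
      (PySem.Dict.empty, PySem.Dict.empty, PySem.Dict.empty)
  (s.1.items, s.2.1.items, s.2.2.items)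

-- ===== PRECONDITION & SPEC =====
def Spec_make_word_ngrams (word_unigram_counter : List (String × Int)) (out : (List (String × Int)) × (List (List String × Int)) × (List (List String × Int))) : Prop := out = make_word_ngrams_alt word_unigram_counter
instance (word_unigram_counter : List (String × Int)) (out : (List (String × Int)) × (List (List String × Int)) × (List (List String × Int))) : Decidable (Spec_make_word_ngrams word_unigram_counter out) := by unfold Spec_make_word_ngrams; infer_instance

-- ===== CLAIM (what is proved, stated in full; the proofs are below) =====
def Claim_equal_make_word_ngrams : Prop := ∀ (word_unigram_counter : List (String × Int)), Dom_make_word_ngrams word_unigram_counter → Spec_make_word_ngrams word_unigram_counter (make_word_ngrams word_unigram_counter)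

-- ===== LEMMAS AND PROOFS =====

-- sliding window with both previous characters known ↔ A's three folds over the n-gram zips
theorem pvScan_some_some (freq : Int) (cs : List Char) :
    ∀ (p2 p1 : Char) (u : PySem.Dict String Int) (b t : PySem.Dict (List String) Int),
    pvScan freq cs (some p2) (some p1) (u, b, t) =
      (cs.foldl (fun d c => d.modify c.toString 0 (· + freq)) u,
       ((p1 :: cs).zip cs).foldl (fun d q => d.modify [q.1.toString, q.2.toString] 0 (· + freq)) b,
       (pvZip3 (p2 :: p1 :: cs) (p1 :: cs) cs).foldl
         (fun d q => d.modify [q.1.toString, q.2.1.toString, q.2.2.toString] 0 (· + freq)) t) := by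
  induction cs with
  | nil => intro p2 p1 u b t; rfl
  | cons ch cs ih =>
    intro p2 p1 u b t
    simp only [pvScan, pvZip3, List.zip, List.zipWith, List.foldl_cons]
    rw [ih]
    rfl

theorem pvScan_none_some (freq : Int) (cs : List Char) (p1 : Char)
    (u : PySem.Dict String Int) (b t : PySem.Dict (List String) Int) :
    pvScan freq cs none (some p1) (u, b, t) =
      (cs.foldl (fun d c => d.modify c.toString 0 (· + freq)) u,
       ((p1 :: cs).zip cs).foldl (fun d q => d.modify [q.1.toString, q.2.toString] 0 (· + freq)) b,
       (pvZip3 (p1 :: cs) cs (cs.drop 1)).foldl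
         (fun d q => d.modify [q.1.toString, q.2.1.toString, q.2.2.toString] 0 (· + freq)) t) := by
  cases cs with
  | nil => rfl
  | cons ch cs =>
    simp only [pvScan, List.zip, List.zipWith, List.foldl_cons, List.drop_succ_cons, List.drop_zero]
    rw [pvScan_some_some]
    rfl

theorem pvScan_none_none (freq : Int) (cs : List Char)
    (u : PySem.Dict String Int) (b t : PySem.Dict (List String) Int) :
    pvScan freq cs none none (u, b, t) =
      (cs.foldl (fun d c => d.modify c.toString 0 (· + freq)) u,
       (cs.zip (cs.drop 1)).foldl (fun d q => d.modify [q.1.toString, q.2.toString] 0 (· + freq)) b,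
       (pvZip3 cs (cs.drop 1) (cs.drop 2)).foldl
         (fun d q => d.modify [q.1.toString, q.2.1.toString, q.2.2.toString] 0 (· + freq)) t) := by
  cases cs with
  | nil => rfl
  | cons ch cs =>
    simp only [pvScan, List.drop_succ_cons, List.drop_zero]
    rw [pvScan_none_some]
    rfl

-- ===== VERDICT (by name: the statement is the Claim_ definition above) =====
theorem make_word_ngrams_spec : Claim_equal_make_word_ngrams := by
  intro wuc _
  unfold Spec_make_word_ngrams make_word_ngrams make_word_ngrams_alt
  have h : ∀ (s : pvState) (p : String × Int),
      pvScan p.2 ('#' :: p.1.toList ++ ['#']) none none s =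
      (let (u, b, t) := s
       let freq := p.2
       let word := '#' :: p.1.toList ++ ['#']
       let uniphones := word
       let biphones := uniphones.zip (uniphones.drop 1)
       let triphones := pvZip3 uniphones (uniphones.drop 1) (uniphones.drop 2)
       let u := uniphones.foldl (fun d c => d.modify c.toString 0 (· + freq)) u
       let b := biphones.foldl (fun d q => d.modify [q.1.toString, q.2.toString] 0 (· + freq)) b
       let t := triphones.foldl
         (fun d q => d.modify [q.1.toString, q.2.1.toString, q.2.2.toString] 0 (· + freq)) t
       (u, b, t)) := by
    intro s p
    obtain ⟨u, b, t⟩ := s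
    exact pvScan_none_none p.2 ('#' :: p.1.toList ++ ['#']) u b t
  rw [show (fun (s : pvState) p =>
      let (u, b, t) := s
      let freq := p.2
      let word := '#' :: p.1.toList ++ ['#']
      let uniphones := word
      let biphones := uniphones.zip (uniphones.drop 1)
      let triphones := pvZip3 uniphones (uniphones.drop 1) (uniphones.drop 2)
      let u := uniphones.foldl (fun d c => d.modify c.toString 0 (· + freq)) u
      let b := biphones.foldl (fun d q => d.modify [q.1.toString, q.2.toString] 0 (· + freq)) b
      let t := triphones.foldl
        (fun d q => d.modify [q.1.toString, q.2.1.toString, q.2.2.toString] 0 (· + freq)) t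
      (u, b, t)) =
      (fun (s : pvState) p => pvScan p.2 ('#' :: p.1.toList ++ ['#']) none none s)
    from funext fun s => funext fun p => (h s p).symm]
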